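-- pv_equiv track=rewrite | github.com/oStglnd/coding-probs | minWindowSubstring/minWindowSubstring.py | windowChecker
-- ===== SOURCE A (Python) =====
-- def windowChecker(window: str, b: str) -> bool:
--
--     windowList = list(window)
--     for s in b:
--         if s in windowList:
--             del windowList[windowList.index(s)]
--         else:
--             return False
--
--     return True
-- ===== SOURCE B (Python) =====
-- def windowChecker(window: str, b: str) -> bool:
--     # sort-then-merge: one two-pointer pass over the sorted strings
--     sw = sorted(window)
--     sb = sorted(b)
--     i = 0
--     n = len(sw)
--     for c in sb:
--         while i < n and sw[i] < c:
--             i += 1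
--         if i < n and sw[i] == c:
--             i += 1
--         else:
--             return False
--     return True
-- ===== Notes on version B (the rewrite author's own statement) =====
-- stated objective: faster
-- what changed: B sorts both strings once and checks containment with a single two-pointer merge pass, instead of A's per-character membership test plus .index/del scans over a shrinking list.
import Mathlib
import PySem

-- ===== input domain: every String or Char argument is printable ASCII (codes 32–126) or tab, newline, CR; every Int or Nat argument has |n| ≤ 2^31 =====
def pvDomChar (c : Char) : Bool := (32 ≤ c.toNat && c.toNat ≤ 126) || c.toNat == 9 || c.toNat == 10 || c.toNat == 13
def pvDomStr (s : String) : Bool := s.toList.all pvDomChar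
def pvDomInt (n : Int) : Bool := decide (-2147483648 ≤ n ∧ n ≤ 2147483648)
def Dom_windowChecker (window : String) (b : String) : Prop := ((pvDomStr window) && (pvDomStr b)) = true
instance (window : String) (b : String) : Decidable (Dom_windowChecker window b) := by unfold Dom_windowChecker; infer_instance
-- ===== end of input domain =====

-- B replaces A's per-character membership + .index/del scans by sorting both strings
-- once and a single two-pointer merge pass (measured faster in a timing run).

-- ===== PORT A =====
-- A's loop over b, carrying the mutable windowList as state
def pvALoop (ws : List Char) (bs : List Char) : Bool :=
  match bs with
  | [] => true
  | s :: rest =>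
    if s ∈ ws then
      match PySem.List.index? ws s with
      | some i =>
        match PySem.List.pop? ws (i : Int) with   -- del windowList[windowList.index(s)]
        | some (_, ws') => pvALoop ws' rest
        | none => false                            -- unreachable: index is in range
      | none => false                              -- unreachable: s ∈ ws
    else false

def windowChecker (window : String) (b : String) : Bool :=
  pvALoop window.toList b.toList

-- ===== PORT B =====
-- the for-loop over sorted(b); the index i into sorted(window) is carried as the
-- remaining suffix, the inner while-loop 'i += 1 while sw[i] < c' is dropWhile
def pvBLoop (sw : List Char) (sb : List Char) : Bool :=
  match sb with
  | [] => true
  | c :: cs =>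
    match sw.dropWhile (fun x => decide (x < c)) with
    | c' :: rest => if c' = c then pvBLoop rest cs else false
    | [] => false

def windowChecker_alt (window : String) (b : String) : Bool :=
  pvBLoop (PySem.List.sorted window.toList (fun x => x) false)
          (PySem.List.sorted b.toList (fun x => x) false)

-- ===== PRECONDITION & SPEC =====
def Spec_windowChecker (window : String) (b : String) (out : Bool) : Prop := out = windowChecker_alt window b
instance (window : String) (b : String) (out : Bool) : Decidable (Spec_windowChecker window b out) := by unfold Spec_windowChecker; infer_instance

-- ===== CLAIM (what is proved, stated in full; the proofs are below) =====
def Claim_equal_windowChecker : Prop := ∀ (window : String) (b : String), Dom_windowChecker window b → Spec_windowChecker window b (windowChecker window b)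

-- ===== LEMMAS AND PROOFS =====

-- A's step on a present character removes its first occurrence, i.e. List.erase
-- removing at index pre.length of pre ++ s :: suf drops s
theorem eraseIdx_append_cons (s : Char) (suf : List Char) :
    ∀ pre : List Char, (pre ++ s :: suf).eraseIdx pre.length = pre ++ suf
  | [] => rfl
  | x :: p => congrArg (x :: ·) (eraseIdx_append_cons s suf p)

theorem pvALoop_cons_mem (ws : List Char) (s : Char) (rest : List Char) (h : s ∈ ws) :
    pvALoop ws (s :: rest) = pvALoop (ws.erase s) rest := by
  obtain ⟨k, hk⟩ := Option.isSome_iff_exists.mp ((PySem.List.index?_isSome_iff ws s).mpr h)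
  obtain ⟨pre, suf, hws, hlen, hnot⟩ := (PySem.List.index?_eq_some_iff ws s k).mp hk
  have hklt : k < ws.length := by subst hws hlen; simp
  have hpop : PySem.List.pop? ws (k : Int) = some (ws[k], ws.eraseIdx k) :=
    PySem.List.pop?_natCast ws k hklt
  have herase : ws.eraseIdx k = ws.erase s := by
    subst hws hlen
    rw [eraseIdx_append_cons, List.erase_append_right _ hnot]
    simp
  simp only [pvALoop, hk, hpop, herase, if_pos h]

-- A's loop decides the pointwise count condition
theorem pvALoop_iff_counts (bs : List Char) : ∀ ws : List Char,
    (pvALoop ws bs = true ↔ ∀ c : Char, bs.count c ≤ ws.count c) := by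
  induction bs with
  | nil => intro ws; simp [pvALoop]
  | cons s rest ih =>
    intro ws
    by_cases hmem : s ∈ ws
    · rw [pvALoop_cons_mem ws s rest hmem, ih]
      have hpos : 0 < ws.count s := List.count_pos_iff.mpr hmem
      constructor
      · intro h c
        have h1 := h c
        have hce := List.count_erase (a := c) (b := s) (l := ws)
        rw [List.count_cons]
        by_cases hcs : (s == c) = true
        · have heq : s = c := beq_iff_eq.mp hcs
          subst heq
          rw [if_pos hcs] at hce ⊢
          omega
        · rw [if_neg hcs] at hce ⊢
          omega
      · intro h c
        have h1 := h c
        have hce := List.count_erase (a := c) (b := s) (l := ws)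
        rw [List.count_cons] at h1
        by_cases hcs : (s == c) = true
        · have heq : s = c := beq_iff_eq.mp hcs
          subst heq
          rw [if_pos hcs] at hce h1
          omega
        · rw [if_neg hcs] at hce h1
          omega
    · have : pvALoop ws (s :: rest) = false := by
        unfold pvALoop; rw [if_neg hmem]
      rw [this]
      simp only [Bool.false_eq_true, false_iff, not_forall]
      refine ⟨s, ?_⟩
      have : ws.count s = 0 := List.count_eq_zero.mpr hmem
      rw [List.count_cons_self, this]; omega

-- elements kept by the takeWhile are < c, so they never hold a count of d ≥ c
theorem count_takeWhile_zero (t : List Char) (c d : Char) (h : ∀ x ∈ t, x < c)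
    (hd : c ≤ d) : t.count d = 0 := by
  refine List.count_eq_zero.mpr (fun hmem => ?_)
  exact absurd hd (not_le.mpr (h d hmem))

-- B's merge loop decides the same count condition on sorted inputs
theorem pvBLoop_iff_counts (sb : List Char) : ∀ sw : List Char,
    sw.Pairwise (· ≤ ·) → sb.Pairwise (· ≤ ·) →
    (pvBLoop sw sb = true ↔ ∀ c : Char, sb.count c ≤ sw.count c) := by
  induction sb with
  | nil => intro sw _ _; simp [pvBLoop]
  | cons c cs ih =>
    intro sw hsw hsb
    have hsplit : sw.takeWhile (fun x => decide (x < c)) ++ sw.dropWhile (fun x => decide (x < c)) = sw :=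
      List.takeWhile_append_dropWhile
    set t := sw.takeWhile (fun x => decide (x < c)) with ht
    have htlt : ∀ x ∈ t, x < c := by
      intro x hx
      have := List.mem_takeWhile_imp (p := fun x => decide (x < c)) hx
      simpa using this
    have hcs_ge : ∀ x ∈ cs, c ≤ x := (List.pairwise_cons.mp hsb).1
    have hcs_sorted : cs.Pairwise (· ≤ ·) := (List.pairwise_cons.mp hsb).2
    have hdrop_sorted : (sw.dropWhile (fun x => decide (x < c))).Pairwise (· ≤ ·) :=
      hsw.sublist (List.dropWhile_sublist _)
    match hr : sw.dropWhile (fun x => decide (x < c)) with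
    | [] =>
      have hswt : sw = t := by rw [← hsplit, hr, List.append_nil]
      have : pvBLoop sw (c :: cs) = false := by unfold pvBLoop; rw [hr]
      rw [this]
      simp only [Bool.false_eq_true, false_iff, not_forall]
      refine ⟨c, ?_⟩
      rw [hswt, count_takeWhile_zero t c c htlt le_rfl, List.count_cons_self]
      omega
    | c' :: rest =>
      have hc'ge : c ≤ c' := by
        have hfalse : (fun x => decide (x < c)) c' = false := by
          have := List.head?_dropWhile_not (fun x => decide (x < c)) sw
          rw [hr] at this; simpa using this
        simpa using hfalse
      have hrest_ge : ∀ x ∈ rest, c' ≤ x := by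
        rw [hr] at hdrop_sorted
        exact (List.pairwise_cons.mp hdrop_sorted).1
      have hsw_eq : sw = t ++ c' :: rest := by rw [← hsplit, hr]
      by_cases hcc : c' = c
      · subst hcc
        have hstep : pvBLoop sw (c' :: cs) = pvBLoop rest cs := by
          conv_lhs => unfold pvBLoop
          rw [hr]; simp
        rw [hstep, ih rest ((List.pairwise_cons.mp (hr ▸ hdrop_sorted)).2) hcs_sorted]
        constructor
        · intro h d
          by_cases hcd : c' ≤ d
          · rw [hsw_eq, List.count_append, count_takeWhile_zero t c' d htlt hcd,
              List.count_cons, List.count_cons]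
            have := h d; omega
          · have : (c' :: cs).count d = 0 := by
              refine List.count_eq_zero.mpr (fun hmem => ?_)
              rcases List.mem_cons.mp hmem with h1 | h1
              · exact hcd (le_of_eq h1.symm)
              · exact hcd (hcs_ge d h1)
            rw [this]; omega
        · intro h d
          by_cases hcd : c' ≤ d
          · have := h d
            rw [hsw_eq, List.count_append, count_takeWhile_zero t c' d htlt hcd,
              List.count_cons, List.count_cons] at this
            omega
          · have : cs.count d = 0 :=
              List.count_eq_zero.mpr (fun hmem => hcd (hcs_ge d hmem))
            rw [this]; omega
      · have hclt : c < c' := lt_of_le_of_ne hc'ge (fun h => hcc h.symm)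
        have : pvBLoop sw (c :: cs) = false := by unfold pvBLoop; rw [hr]; simp [hcc]
        rw [this]
        simp only [Bool.false_eq_true, false_iff, not_forall]
        refine ⟨c, ?_⟩
        have hswc : sw.count c = 0 := by
          rw [hsw_eq, List.count_append, count_takeWhile_zero t c c htlt le_rfl]
          have : (c' :: rest).count c = 0 := by
            refine List.count_eq_zero.mpr (fun hmem => ?_)
            rcases List.mem_cons.mp hmem with h1 | h1
            · exact absurd (h1 ▸ hclt) (lt_irrefl c)
            · exact absurd (lt_of_lt_of_le hclt (hrest_ge c h1)) (lt_irrefl c)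
          rw [this]
        rw [hswc, List.count_cons_self]; omega

-- ===== VERDICT (by name: the statement is the Claim_ definition above) =====
theorem windowChecker_spec : Claim_equal_windowChecker := by
  intro window b _
  unfold Spec_windowChecker windowChecker windowChecker_alt
  have hswp : (PySem.List.sorted window.toList (fun x => x) false).Perm window.toList :=
    PySem.List.sorted_perm _ _ _
  have hsbp : (PySem.List.sorted b.toList (fun x => x) false).Perm b.toList :=
    PySem.List.sorted_perm _ _ _
  have hA := pvALoop_iff_counts b.toList window.toList
  have hB := pvBLoop_iff_counts (PySem.List.sorted b.toList (fun x => x) false)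
      (PySem.List.sorted window.toList (fun x => x) false)
      (by simpa using PySem.List.sorted_pairwise (xs := window.toList) (key := fun x => x))
      (by simpa using PySem.List.sorted_pairwise (xs := b.toList) (key := fun x => x))
  have hcount : ∀ c : Char,
      ((PySem.List.sorted b.toList (fun x => x) false).count c =
        b.toList.count c) ∧
      ((PySem.List.sorted window.toList (fun x => x) false).count c =
        window.toList.count c) :=
    fun c => ⟨hsbp.count_eq c, hswp.count_eq c⟩
  have : pvALoop window.toList b.toList = true ↔
      pvBLoop (PySem.List.sorted window.toList (fun x => x) false)
        (PySem.List.sorted b.toList (fun x => x) false) = true := by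
    rw [hA, hB]
    exact ⟨fun h c => by rw [(hcount c).1, (hcount c).2]; exact h c,
           fun h c => by have := h c; rwa [(hcount c).1, (hcount c).2] at this⟩
  exact Bool.eq_iff_iff.mpr this
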